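-- pv_equiv track=rewrite | github.com/huytq000605/CF-CP | Codeforces Round #764/C.py | solve
-- ===== SOURCE A (Python) =====
-- def solve(arr, n):
-- 	count = [0 for i in range(n + 1)]
-- 	for i in range(n):
-- 		num = arr[i]
-- 		while num > 0:
-- 			if num <= n:
-- 				count[num] += 1
-- 			num >>= 1
--
-- 	for i in range(n, 0, -1):
-- 		num = i
-- 		if count[num] == 0:
-- 			return False
-- 		while num > 0:
-- 			count[num] -= 1
-- 			num >>= 1
--
-- 	return True
-- ===== SOURCE B (Python) =====
-- def solve(arr, n):
--     if n <= 0: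
--         return True
--     # count[v] = number of the first n elements whose halving chain passes through v (v <= n)
--     count = [0] * (n + 1)
--     for x in arr[:n]:
--         while x > n:
--             x >>= 1
--         while x > 0:
--             count[x] += 1
--             x >>= 1
--     # Hall condition on the laminar value tree: every subtree of values must be
--     # covered by at least as many elements as it contains values.
--     size = [0] * (n + 1)
--     for v in range(n, 0, -1):
--         s = 1
--         if 2 * v <= n:
--             s += size[2 * v]
--         if 2 * v + 1 <= n:
--             s += size[2 * v + 1]
--         size[v] = s
--         if count[v] < s:
--             return False
--     return True
-- ===== Notes on version B (the rewrite author's own statement) =====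
-- stated objective: alternative
-- what changed: The consuming greedy second pass (pick each value n..1 and decrement counts along its halving chain) is replaced by a Hall-condition feasibility check: compute subtree sizes on the value tree (children of v are 2v and 2v+1) and return True iff count[v] >= size[v] for every v in 1..n.
import Mathlib
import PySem

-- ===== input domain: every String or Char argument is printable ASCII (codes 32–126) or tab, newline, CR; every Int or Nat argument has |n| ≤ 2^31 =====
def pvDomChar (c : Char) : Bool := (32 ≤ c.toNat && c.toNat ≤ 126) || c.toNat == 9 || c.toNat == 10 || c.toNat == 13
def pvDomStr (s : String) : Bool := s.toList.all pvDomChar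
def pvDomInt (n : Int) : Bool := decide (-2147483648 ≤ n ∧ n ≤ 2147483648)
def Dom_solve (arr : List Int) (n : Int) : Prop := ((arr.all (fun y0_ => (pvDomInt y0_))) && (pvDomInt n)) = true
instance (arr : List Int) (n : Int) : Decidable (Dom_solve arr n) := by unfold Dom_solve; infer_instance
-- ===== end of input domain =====

-- B replaces A's consuming greedy second pass by a Hall-condition check (count[v] ≥ subtree size
-- for every value v); objective: alternative algorithm of similar cost, no speed claim.

-- ===== PORT A =====
-- 'while num > 0: if num <= n: count[num] += 1; num >>= 1'  ('num >>= 1' on a positive int is floor division by 2)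
def chainAddA (n : Int) (num : Int) (count : List Int) : List Int :=
  if 0 < num then
    chainAddA n (num / 2)
      (if num ≤ n then count.set num.toNat (count.getD num.toNat 0 + 1) else count)
  else count
termination_by num.toNat
decreasing_by omega

-- 'while num > 0: count[num] -= 1; num >>= 1'  (all visited indices satisfy 1 ≤ num ≤ n, hence are in range)
def chainSubA (num : Int) (count : List Int) : List Int :=
  if 0 < num then chainSubA (num / 2) (count.set num.toNat (count.getD num.toNat 0 - 1)) else count
termination_by num.toNat
decreasing_by omega

-- 'for i in range(n, 0, -1): if count[i] == 0: return False; <decrement chain of i>'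
def loopA (count : List Int) : Nat → Bool
  | 0 => true
  | k+1 =>
    if count.getD (k+1) 0 = 0 then false
    else loopA (chainSubA ((k+1 : Nat) : Int) count) k

def solve (arr : List Int) (n : Int) : Bool :=
  -- count = [0 for i in range(n + 1)]
  let count : List Int := List.replicate (n+1).toNat 0
  -- for i in range(n): num = arr[i]; <add chain of num>   (arr[i] in range by Pre_: IndexError excluded)
  let count := (PySem.List.pyRange 0 n 1).foldl
      (fun c i => chainAddA n (PySem.List.pyGetD arr i 0) c) count
  loopA count n.toNat

-- ===== PORT B =====
-- 'while x > n: x >>= 1'  (the 0 < x guard only serves Lean's termination: it is implied by n < x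
-- since this loop is reached only when 1 ≤ n)
def bSkip (n x : Int) : Int :=
  if 0 < x ∧ n < x then bSkip n (x / 2) else x
termination_by x.toNat
decreasing_by omega

-- 'while x > 0: count[x] += 1; x >>= 1'  (all visited indices satisfy 1 ≤ x ≤ n, hence are in range)
def bAdd (x : Int) (count : List Int) : List Int :=
  if 0 < x then bAdd (x / 2) (count.set x.toNat (count.getD x.toNat 0 + 1)) else count
termination_by x.toNat
decreasing_by omega

-- 'for v in range(n, 0, -1): s = 1 + …; size[v] = s; if count[v] < s: return False'
def sizeLoop (n : Int) (count : List Int) (size : List Int) : Nat → Bool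
  | 0 => true
  | k+1 =>
    let v : Int := ((k+1 : Nat) : Int)
    let s : Int := 1 + (if 2*v ≤ n then size.getD (2*v).toNat 0 else 0)
                     + (if 2*v+1 ≤ n then size.getD (2*v+1).toNat 0 else 0)
    let size' := size.set (k+1) s
    if count.getD (k+1) 0 < s then false
    else sizeLoop n count size' k

def solve_alt (arr : List Int) (n : Int) : Bool :=
  if n ≤ 0 then true
  else
    let count : List Int := List.replicate (n+1).toNat 0
    -- for x in arr[:n]: <skip chain values above n, then add the rest>
    let count := (PySem.List.slice arr none (some n)).foldl (fun c x => bAdd (bSkip n x) c) count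
    sizeLoop n count (List.replicate (n+1).toNat 0) n.toNat

-- ===== PRECONDITION & SPEC =====
-- Pre_ excludes exactly n > len(arr), where A raises IndexError at arr[i]
def Pre_solve (arr : List Int) (n : Int) : Prop := n ≤ (arr.length : Int)
instance (arr : List Int) (n : Int) : Decidable (Pre_solve arr n) := by unfold Pre_solve; infer_instance

def pvWitness_solve : List Int × Int := ([2, 2], 2)

def Spec_solve (arr : List Int) (n : Int) (out : Bool) : Prop := out = solve_alt arr n
instance (arr : List Int) (n : Int) (out : Bool) : Decidable (Spec_solve arr n out) := by unfold Spec_solve; infer_instance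

-- ===== CLAIM (what is proved, stated in full; the proofs are below) =====
def Claim_equal_solve : Prop := ∀ (arr : List Int) (n : Int), Dom_solve arr n → Pre_solve arr n → Spec_solve arr n (solve arr n)

-- ===== LEMMAS AND PROOFS =====


-- chain membership: inChain w x ↔ w appears in x, x/2, x/4, …, 1
def inChain (w : Nat) (x : Nat) : Bool :=
  if x = 0 then false else (decide (x = w)) || inChain w (x / 2)
termination_by x
decreasing_by omega

theorem inChain_le {w x : Nat} (h : inChain w x = true) : 1 ≤ w ∧ w ≤ x := by
  induction x using Nat.strong_induction_on with
  | _ x ih =>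
    unfold inChain at h
    by_cases hx : x = 0
    · simp [hx] at h
    · simp [hx] at h
      rcases h with h | h
      · omega
      · have := ih (x / 2) (by omega) h
        omega

theorem inChain_self {x : Nat} (h : 1 ≤ x) : inChain x x = true := by
  unfold inChain
  have hx : ¬ (x = 0) := by omega
  simp [hx]

theorem inChain_step {w x : Nat} (h : inChain w (x / 2) = true) (hx : x ≠ 0) : inChain w x = true := by
  unfold inChain; simp [hx, h]

theorem inChain_trans {w y x : Nat} (h1 : inChain w y = true) (h2 : inChain y x = true) : inChain w x = true := by
  induction x using Nat.strong_induction_on with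
  | _ x ih =>
    unfold inChain at h2
    by_cases hx : x = 0
    · simp [hx] at h2
    · simp [hx] at h2
      rcases h2 with h2 | h2
      · subst h2; exact h1
      · exact inChain_step (ih (x / 2) (by omega) h2) hx

theorem inChain_not_both {v x : Nat} (h1 : inChain (2*v) x = true) (h2 : inChain (2*v+1) x = true) : False := by
  induction x using Nat.strong_induction_on with
  | _ x ih =>
    have hv1 := inChain_le h1
    have hv2 := inChain_le h2
    unfold inChain at h1 h2
    have hx : x ≠ 0 := by omega
    simp [hx] at h1 h2
    rcases h1 with h1 | h1 <;> rcases h2 with h2 | h2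
    · omega
    · have := inChain_le h2; omega
    · have := inChain_le h1; omega
    · exact ih (x / 2) (by omega) h1 h2

theorem inChain_split {v x : Nat} (hx : x ≠ v) (h : inChain v x = true) (hv : 1 ≤ v) :
    inChain (2*v) x = true ∨ inChain (2*v+1) x = true := by
  induction x using Nat.strong_induction_on with
  | _ x ih =>
    unfold inChain at h
    by_cases h0 : x = 0
    · simp [h0] at h
    · simp [h0] at h
      rcases h with h | h
      · omega
      · by_cases hhalf : x / 2 = v
        · have : x = 2*v ∨ x = 2*v+1 := by omega
          rcases this with rfl | rfl
          · exact Or.inl (inChain_self (by omega))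
          · exact Or.inr (inChain_self (by omega))
        · rcases ih (x / 2) (by omega) hhalf h with h' | h'
          · exact Or.inl (inChain_step h' h0)
          · exact Or.inr (inChain_step h' h0)

-- number of values in 1..N in the subtree of v (children of v are 2v and 2v+1)
def sz (N : Nat) (v : Nat) : Nat :=
  if h : 1 ≤ v ∧ v ≤ N then 1 + sz N (2*v) + sz N (2*v+1) else 0
termination_by N + 1 - v
decreasing_by all_goals omega

theorem sz_eq {N v : Nat} (h : 1 ≤ v ∧ v ≤ N) : sz N v = 1 + sz N (2*v) + sz N (2*v+1) := by
  rw [sz]; simp [h]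

theorem sz_zero {N v : Nat} (h : ¬ (1 ≤ v ∧ v ≤ N)) : sz N v = 0 := by
  rw [sz]; simp [h]

theorem inChain_parent_l {v : Nat} (hv : 1 ≤ v) : inChain v (2*v) = true := by
  apply inChain_step _ (by omega)
  have h2 : 2*v/2 = v := by omega
  rw [h2]; exact inChain_self hv

theorem inChain_parent_r {v : Nat} (hv : 1 ≤ v) : inChain v (2*v+1) = true := by
  apply inChain_step _ (by omega)
  have h2 : (2*v+1)/2 = v := by omega
  rw [h2]; exact inChain_self hv

def Tset (N v : Nat) : Finset Nat := (Finset.Icc 1 N).filter (fun u => inChain v u = true)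

theorem card_T (N v : Nat) : (Tset N v).card = sz N v := by
  by_cases h : 1 ≤ v ∧ v ≤ N
  · have e : Tset N v = insert v (Tset N (2*v) ∪ Tset N (2*v+1)) := by
      ext u
      simp only [Tset, Finset.mem_filter, Finset.mem_Icc, Finset.mem_insert, Finset.mem_union]
      constructor
      · rintro ⟨hb, hc⟩
        by_cases huv : u = v
        · exact Or.inl huv
        · rcases inChain_split huv hc h.1 with h' | h'
          · exact Or.inr (Or.inl ⟨hb, h'⟩)
          · exact Or.inr (Or.inr ⟨hb, h'⟩)
      · rintro (rfl | ⟨hb, hc⟩ | ⟨hb, hc⟩)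
        · exact ⟨⟨h.1, h.2⟩, inChain_self h.1⟩
        · exact ⟨hb, inChain_trans (inChain_parent_l h.1) hc⟩
        · exact ⟨hb, inChain_trans (inChain_parent_r h.1) hc⟩
    have hnm : v ∉ Tset N (2*v) ∪ Tset N (2*v+1) := by
      intro hm
      rcases Finset.mem_union.mp hm with hm | hm <;>
        · have := inChain_le (Finset.mem_filter.mp hm).2; omega
    have hdisj : Disjoint (Tset N (2*v)) (Tset N (2*v+1)) := by
      rw [Finset.disjoint_left]
      intro u h1 h2
      exact inChain_not_both (Finset.mem_filter.mp h1).2 (Finset.mem_filter.mp h2).2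
    rw [e, Finset.card_insert_of_notMem hnm, Finset.card_union_of_disjoint hdisj,
        card_T N (2*v), card_T N (2*v+1), sz_eq h]
    omega
  · have e : Tset N v = ∅ := by
      ext u
      simp only [Tset, Finset.mem_filter, Finset.mem_Icc, Finset.notMem_empty, iff_false]
      rintro ⟨hb, hc⟩
      have := inChain_le hc
      omega
    rw [e, sz_zero h, Finset.card_empty]
termination_by N + 1 - v
decreasing_by all_goals omega

def subC (N i w : Nat) : Int := (((Finset.Ioc i N).filter (fun u => inChain w u = true)).card : Int)

theorem sz_pos {N v : Nat} (h : 1 ≤ v ∧ v ≤ N) : 1 ≤ sz N v := by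
  rw [sz_eq h]; omega

theorem subC_self {N v : Nat} (h : 1 ≤ v ∧ v ≤ N) : subC N v v = (sz N v : Int) - 1 := by
  have e : (Finset.Ioc v N).filter (fun u => inChain v u = true) = (Tset N v).erase v := by
    ext u
    simp only [Finset.mem_filter, Finset.mem_Ioc, Tset, Finset.mem_erase, Finset.mem_Icc]
    constructor
    · rintro ⟨⟨h1, h2⟩, h3⟩
      exact ⟨by omega, ⟨by omega, h2⟩, h3⟩
    · rintro ⟨hne, ⟨h1, h2⟩, h3⟩
      have := inChain_le h3
      exact ⟨⟨by omega, h2⟩, h3⟩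
  have hm : v ∈ Tset N v := by
    simp only [Tset, Finset.mem_filter, Finset.mem_Icc]
    exact ⟨⟨h.1, h.2⟩, inChain_self h.1⟩
  have hc := Finset.card_erase_of_mem hm
  rw [subC, e, hc, card_T]
  have := sz_pos h
  omega

theorem subC_top (N w : Nat) : subC N N w = 0 := by
  simp [subC]

theorem subC_step {N k : Nat} (h : k + 1 ≤ N) (w : Nat) :
    subC N k w = subC N (k+1) w + (if inChain w (k+1) = true then (1:Int) else 0) := by
  have e : Finset.Ioc k N = insert (k+1) (Finset.Ioc (k+1) N) := by
    ext u; simp only [Finset.mem_Ioc, Finset.mem_insert]; omega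
  rw [subC, subC, e, Finset.filter_insert]
  by_cases hc : inChain w (k+1) = true
  · rw [if_pos hc, Finset.card_insert_of_notMem (by simp)]
    simp [hc]
  · rw [if_neg hc]
    simp [hc]

-- A's consuming greedy, abstracted to a count function
def gA (f : Nat → Int) : Nat → Bool
  | 0 => true
  | k+1 =>
    if f (k+1) = 0 then false
    else gA (fun w => f w - (if inChain w (k+1) = true then 1 else 0)) k

theorem gA_hall (N : Nat) (c : Nat → Int) (hnn : ∀ w, 0 ≤ c w)
    (hsup : ∀ v, 1 ≤ v → c (2*v) + c (2*v+1) ≤ c v) :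
    ∀ i, i ≤ N → (∀ u, i < u → u ≤ N → (sz N u : Int) ≤ c u) →
      gA (fun w => c w - subC N i w) i = decide (∀ v, v ≤ i → 1 ≤ v → (sz N v : Int) ≤ c v) := by
  intro i
  induction i with
  | zero =>
    intro _ _
    exact (decide_eq_true (by omega)).symm
  | succ k ih =>
    intro hk hinv
    have hv : 1 ≤ k+1 ∧ k+1 ≤ N := ⟨by omega, hk⟩
    have hchild : ∀ d, k+1 < d → (sz N d : Int) ≤ c d := by
      intro d hd
      by_cases hdN : d ≤ N
      · exact hinv d hd hdN
      · rw [sz_zero (by omega)]; exact_mod_cast hnn d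
    have hlow : (sz N (k+1) : Int) - 1 ≤ c (k+1) := by
      have h1 := hchild (2*(k+1)) (by omega)
      have h2 := hchild (2*(k+1)+1) (by omega)
      have h3 := hsup (k+1) (by omega)
      have h4 := sz_eq hv
      push_cast [h4]
      omega
    have hself := subC_self hv
    show (if c (k+1) - subC N (k+1) (k+1) = 0 then false
          else gA (fun w => (c w - subC N (k+1) w) - (if inChain w (k+1) = true then 1 else 0)) k)
         = decide (∀ v, v ≤ k+1 → 1 ≤ v → (sz N v : Int) ≤ c v)
    by_cases hok : (sz N (k+1) : Int) ≤ c (k+1)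
    · have hne : c (k+1) - subC N (k+1) (k+1) ≠ 0 := by rw [hself]; omega
      rw [if_neg hne]
      have hf : (fun w => (c w - subC N (k+1) w) - (if inChain w (k+1) = true then 1 else 0))
              = (fun w => c w - subC N k w) := by
        funext w
        rw [subC_step hk w]
        ring
      have hinv' : ∀ u, k < u → u ≤ N → (sz N u : Int) ≤ c u := by
        intro u hu huN
        by_cases hu1 : u = k+1
        · subst hu1; exact hok
        · exact hinv u (by omega) huN
      rw [hf, ih (by omega) hinv']
      rw [decide_eq_decide]
      constructor
      · intro hp v h2 h1
        by_cases hv1 : v = k+1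
        · subst hv1; exact hok
        · exact hp v (by omega) h1
      · intro hp v h2 h1
        exact hp v (by omega) h1
    · have heq : c (k+1) - subC N (k+1) (k+1) = 0 := by rw [hself]; omega
      rw [if_pos heq]
      exact (decide_eq_false (fun hp => hok (hp (k+1) (by omega) (by omega)))).symm


-- ===== list bridges =====



theorem getD_set_helper (c : List Int) (i : Nat) (hi : i < c.length) (v : Int) (w : Nat) :
    (c.set i v).getD w 0 = if w = i then v else c.getD w 0 := by
  unfold List.getD
  rw [List.getElem?_set]
  by_cases hw : w = i
  · simp [hw, hi]
  · have hiw : i ≠ w := fun h => hw h.symm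
    simp [hw, hiw]

theorem half_toNat (num : Int) : (num / 2).toNat = num.toNat / 2 := by omega

theorem chainSubA_length (num : Int) (c : List Int) : (chainSubA num c).length = c.length := by
  induction num, c using chainSubA.induct with
  | case1 num c h ih => rw [chainSubA, if_pos h]; rw [ih]; simp
  | case2 num c h => rw [chainSubA, if_neg h]

theorem chainSubA_getD (num : Int) (c : List Int) (h : num.toNat < c.length) (w : Nat) :
    (chainSubA num c).getD w 0 = c.getD w 0 - (if inChain w num.toNat = true then 1 else 0) := by
  induction num, c using chainSubA.induct with
  | case1 num c hp ih =>
    rw [chainSubA, if_pos hp]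
    have hlen : (num/2).toNat < (c.set num.toNat (c.getD num.toNat 0 - 1)).length := by
      simp; omega
    rw [ih hlen, getD_set_helper c num.toNat h _ w, half_toNat]
    have hnz : num.toNat ≠ 0 := by omega
    by_cases hw : w = num.toNat
    · have h1 : inChain w num.toNat = true := by
        rw [hw]; exact inChain_self (by omega)
      have h2 : inChain w (num.toNat / 2) = false := by
        by_cases hc : inChain w (num.toNat / 2) = true
        · have := inChain_le hc; omega
        · simpa using hc
      rw [if_pos hw]
      rw [hw] at h1 h2
      simp [h1, h2, hw]
    · have hiff : inChain w num.toNat = inChain w (num.toNat / 2) := by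
        conv_lhs => rw [inChain]
        have : ¬ (num.toNat = w) := fun hh => hw hh.symm
        simp [hnz, this]
      rw [if_neg hw, hiff]
  | case2 num c hp =>
    rw [chainSubA, if_neg hp]
    have : num.toNat = 0 := by omega
    rw [this]
    have : inChain w 0 = false := by rw [inChain]; simp
    simp [this]

theorem loopA_gA (k : Nat) (c : List Int) (hk : k < c.length) :
    loopA c k = gA (fun w => c.getD w 0) k := by
  induction k generalizing c with
  | zero => rw [loopA, gA]
  | succ k ih =>
    rw [loopA, gA]
    by_cases h0 : c.getD (k+1) 0 = 0
    · rw [if_pos h0, if_pos h0]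
    · rw [if_neg h0, if_neg h0]
      have hlen : ((k+1 : Nat) : Int).toNat < c.length := by simpa using hk
      have hlen2 : k < (chainSubA ((k+1 : Nat) : Int) c).length := by
        rw [chainSubA_length]; omega
      rw [ih _ hlen2]
      congr 1
      funext w
      rw [chainSubA_getD _ _ hlen w]
      simp

-- per-element contribution: 1 at every chain value w of x with w ≤ N
def indN (N w : Nat) (x : Int) : Int :=
  if inChain w x.toNat = true ∧ w ≤ N then 1 else 0

theorem chainAddA_length (n num : Int) (c : List Int) : (chainAddA n num c).length = c.length := by
  induction num, c using chainAddA.induct (n := n) with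
  | case1 num c h ih =>
    rw [chainAddA, if_pos h]
    simp only [dite_eq_ite] at ih
    rw [ih]
    split <;> simp
  | case2 num c h => rw [chainAddA, if_neg h]

theorem indN_unfold (N w : Nat) (x : Int) (hx : 0 < x) :
    indN N w x = (if x.toNat = w ∧ x ≤ (N : Int) then (1:Int) else 0) + indN N w (x / 2) := by
  have hnz : x.toNat ≠ 0 := by omega
  unfold indN
  rw [half_toNat]
  by_cases hw : x.toNat = w
  · have h1 : inChain w x.toNat = true := by
      rw [hw]; exact inChain_self (by omega)
    have h2 : inChain w (x.toNat / 2) = false := by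
      by_cases hc : inChain w (x.toNat / 2) = true
      · have h3 := inChain_le hc; omega
      · simpa using hc
    have hxN : (x ≤ (N:Int)) ↔ (w ≤ N) := by omega
    rw [hw] at h1 h2
    by_cases hN : w ≤ N
    · simp [h1, h2, hw, hN, hxN.mpr hN]
    · have hxN2 : ¬ (x ≤ (N:Int)) := fun hh => hN (hxN.mp hh)
      simp [h1, h2, hw, hN, hxN2]
  · have hiff : inChain w x.toNat = inChain w (x.toNat / 2) := by
      conv_lhs => rw [inChain]
      have hne : ¬ (x.toNat = w) := hw
      simp [hnz, hne]
    simp [hw, hiff]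

theorem chainAddA_getD (N : Nat) (w : Nat) (x : Int) (c : List Int) (hlen : c.length = N + 1) :
    (chainAddA (N : Int) x c).getD w 0 = c.getD w 0 + indN N w x := by
  have H : ∀ m (x : Int) (c : List Int), x.toNat = m → c.length = N+1 →
      (chainAddA (N:Int) x c).getD w 0 = c.getD w 0 + indN N w x := by
    intro m
    induction m using Nat.strong_induction_on with
    | _ m ih =>
      intro x c hm hlen
      by_cases hp : 0 < x
      · rw [chainAddA, if_pos hp]
        have hstep := indN_unfold N w x hp
        by_cases hle : x ≤ (N:Int)
        · rw [if_pos hle]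
          have hlen2 : (c.set x.toNat (c.getD x.toNat 0 + 1)).length = N+1 := by simp [hlen]
          rw [ih (x/2).toNat (by omega) _ _ rfl hlen2]
          rw [getD_set_helper c x.toNat (by omega) _ w]
          rw [hstep]
          by_cases hw : w = x.toNat
          · have hc : x.toNat = w ∧ x ≤ (N:Int) := ⟨hw.symm, hle⟩
            rw [if_pos hw, if_pos hc, hw]
            ring
          · have hno : ¬ (x.toNat = w ∧ x ≤ (N:Int)) := fun hh => hw hh.1.symm
            rw [if_neg hw, if_neg hno]
            ring
        · rw [if_neg hle]
          rw [ih (x/2).toNat (by omega) _ _ rfl hlen]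
          rw [hstep]
          have hno : ¬ (x.toNat = w ∧ x ≤ (N:Int)) := fun hh => hle hh.2
          simp [hno]
      · rw [chainAddA, if_neg hp]
        have h0 : x.toNat = 0 := by omega
        have hch : inChain w x.toNat = false := by rw [h0, inChain]; simp
        simp [indN, hch]
  exact H x.toNat x c rfl hlen




-- total count over a list of elements
def cnt (N : Nat) (xs : List Int) (w : Nat) : Int := (xs.map (indN N w)).sum

theorem cnt_nil (N w : Nat) : cnt N [] w = 0 := rfl

theorem cnt_cons (N w : Nat) (x : Int) (xs : List Int) : cnt N (x :: xs) w = indN N w x + cnt N xs w := by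
  simp [cnt]

theorem indN_nonneg (N w : Nat) (x : Int) : 0 ≤ indN N w x := by
  unfold indN; split <;> omega

theorem cnt_nonneg (N : Nat) (xs : List Int) (w : Nat) : 0 ≤ cnt N xs w := by
  induction xs with
  | nil => simp [cnt_nil]
  | cons x xs ih => rw [cnt_cons]; have := indN_nonneg N w x; omega

theorem indN_sup (N v : Nat) (hv : 1 ≤ v) (x : Int) :
    indN N (2*v) x + indN N (2*v+1) x ≤ indN N v x := by
  unfold indN
  by_cases h1 : inChain (2*v) x.toNat = true ∧ 2*v ≤ N
  · have h2 : ¬ (inChain (2*v+1) x.toNat = true ∧ 2*v+1 ≤ N) :=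
      fun hh => inChain_not_both h1.1 hh.1
    have h3 : inChain v x.toNat = true ∧ v ≤ N :=
      ⟨inChain_trans (inChain_parent_l hv) h1.1, by omega⟩
    rw [if_pos h1, if_neg h2, if_pos h3]
    omega
  · by_cases h2 : inChain (2*v+1) x.toNat = true ∧ 2*v+1 ≤ N
    · have h3 : inChain v x.toNat = true ∧ v ≤ N :=
        ⟨inChain_trans (inChain_parent_r hv) h2.1, by omega⟩
      rw [if_neg h1, if_pos h2, if_pos h3]
      omega
    · rw [if_neg h1, if_neg h2]
      split <;> omega

theorem cnt_sup (N : Nat) (xs : List Int) (v : Nat) (hv : 1 ≤ v) :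
    cnt N xs (2*v) + cnt N xs (2*v+1) ≤ cnt N xs v := by
  induction xs with
  | nil => simp [cnt_nil]
  | cons x xs ih =>
    rw [cnt_cons, cnt_cons, cnt_cons]
    have := indN_sup N v hv x
    omega

-- generic: a fold whose step adds f w x pointwise
theorem foldl_pointwise (N : Nat) (step : List Int → Int → List Int) (f : Nat → Int → Int)
    (hstep : ∀ c x, c.length = N+1 →
      (step c x).length = N+1 ∧ ∀ w, (step c x).getD w 0 = c.getD w 0 + f w x) :
    ∀ (xs : List Int) (c : List Int), c.length = N+1 →
      (xs.foldl step c).length = N+1 ∧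
      ∀ w, (xs.foldl step c).getD w 0 = c.getD w 0 + (xs.map (f w)).sum := by
  intro xs
  induction xs with
  | nil => intro c hc; simpa using hc
  | cons x xs ih =>
    intro c hc
    have h1 := hstep c x hc
    have h2 := ih (step c x) h1.1
    refine ⟨h2.1, ?_⟩
    intro w
    rw [List.foldl_cons, h2.2 w, h1.2 w]
    simp
    ring

theorem bSkip_le (n x : Int) (hn : 1 ≤ n) : bSkip n x ≤ n := by
  induction x using bSkip.induct (n := n) with
  | case1 x h ih => rw [bSkip, if_pos h]; exact ih
  | case2 x h => rw [bSkip, if_neg h]; omega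

theorem bSkip_ind (N : Nat) (w : Nat) (x : Int) :
    indN N w (bSkip (N : Int) x) = indN N w x := by
  induction x using bSkip.induct (n := (N : Int)) with
  | case1 x h ih =>
    rw [bSkip, if_pos h, ih]
    unfold indN
    rw [half_toNat]
    by_cases hc : inChain w x.toNat = true ∧ w ≤ N
    · have hnz : x.toNat ≠ 0 := by omega
      have hne : ¬ (x.toNat = w) := by
        have := inChain_le hc.1
        omega
      have hdown : inChain w (x.toNat / 2) = true := by
        have := hc.1
        rw [inChain] at this
        simpa [hnz, hne] using this
      simp [hc, hdown]
    · have hup : ¬ (inChain w (x.toNat / 2) = true ∧ w ≤ N) := by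
        rintro ⟨ha, hb⟩
        have hnz : x.toNat ≠ 0 := by omega
        exact hc ⟨inChain_step ha hnz, hb⟩
      rw [if_neg hc, if_neg hup]
  | case2 x h => rw [bSkip, if_neg h]

theorem bAdd_length (x : Int) (c : List Int) : (bAdd x c).length = c.length := by
  induction x, c using bAdd.induct with
  | case1 x c h ih => rw [bAdd, if_pos h]; rw [ih]; simp
  | case2 x c h => rw [bAdd, if_neg h]

theorem bAdd_getD (N w : Nat) (x : Int) (c : List Int) (hx : x ≤ (N : Int)) (hlen : c.length = N+1) :
    (bAdd x c).getD w 0 = c.getD w 0 + indN N w x := by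
  have H : ∀ m (x : Int) (c : List Int), x.toNat = m → x ≤ (N:Int) → c.length = N+1 →
      (bAdd x c).getD w 0 = c.getD w 0 + indN N w x := by
    intro m
    induction m using Nat.strong_induction_on with
    | _ m ih =>
      intro x c hm hx hlen
      by_cases hp : 0 < x
      · rw [bAdd, if_pos hp]
        have hlen2 : (c.set x.toNat (c.getD x.toNat 0 + 1)).length = N+1 := by simp [hlen]
        rw [ih (x/2).toNat (by omega) _ _ rfl (by omega) hlen2]
        rw [getD_set_helper c x.toNat (by omega) _ w]
        rw [indN_unfold N w x hp]
        by_cases hw : w = x.toNat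
        · have hc : x.toNat = w ∧ x ≤ (N:Int) := ⟨hw.symm, hx⟩
          rw [if_pos hw, if_pos hc, hw]
          ring
        · have hno : ¬ (x.toNat = w ∧ x ≤ (N:Int)) := fun hh => hw hh.1.symm
          rw [if_neg hw, if_neg hno]
          ring
      · rw [bAdd, if_neg hp]
        have h0 : x.toNat = 0 := by omega
        have hch : inChain w x.toNat = false := by rw [h0, inChain]; simp
        simp [indN, hch]
  exact H x.toNat x c rfl hx hlen

theorem sizeLoop_spec (N : Nat) (c szl : List Int) :
    ∀ k, k ≤ N → szl.length = N+1 → (∀ u, k < u → u ≤ N → szl.getD u 0 = (sz N u : Int)) →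
      sizeLoop (N : Int) c szl k = decide (∀ v, v ≤ k → 1 ≤ v → (sz N v : Int) ≤ c.getD v 0) := by
  intro k
  induction k generalizing szl with
  | zero =>
    intro _ _ _
    exact (decide_eq_true (by omega)).symm
  | succ k ih =>
    intro hk hlen hinv
    rw [sizeLoop]
    have hv2 : ((2 * ((k+1 : Nat) : Int)).toNat) = 2*(k+1) := by omega
    have hv3 : ((2 * ((k+1 : Nat) : Int) + 1).toNat) = 2*(k+1)+1 := by omega
    have hsl : (if 2 * ((k+1 : Nat) : Int) ≤ (N:Int) then szl.getD (2 * ((k+1 : Nat) : Int)).toNat 0 else 0)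
        = (sz N (2*(k+1)) : Int) := by
      by_cases hle : 2 * ((k+1 : Nat) : Int) ≤ (N:Int)
      · rw [if_pos hle, hv2, hinv (2*(k+1)) (by omega) (by omega)]
      · rw [if_neg hle, sz_zero (by omega)]
        simp
    have hsr : (if 2 * ((k+1 : Nat) : Int) + 1 ≤ (N:Int) then szl.getD (2 * ((k+1 : Nat) : Int) + 1).toNat 0 else 0)
        = (sz N (2*(k+1)+1) : Int) := by
      by_cases hle : 2 * ((k+1 : Nat) : Int) + 1 ≤ (N:Int)
      · rw [if_pos hle, hv3, hinv (2*(k+1)+1) (by omega) (by omega)]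
      · rw [if_neg hle, sz_zero (by omega)]
        simp
    simp only [hsl, hsr]
    have hs : (1 : Int) + (sz N (2*(k+1)) : Int) + (sz N (2*(k+1)+1) : Int) = (sz N (k+1) : Int) := by
      rw [sz_eq ⟨by omega, hk⟩]
      push_cast
      ring
    rw [hs]
    by_cases hfail : c.getD (k+1) 0 < (sz N (k+1) : Int)
    · rw [if_pos hfail]
      exact (decide_eq_false (fun hp => absurd (hp (k+1) (by omega) (by omega)) (by omega))).symm
    · rw [if_neg hfail]
      have hlen2 : (szl.set (k+1) ((sz N (k+1) : Int))).length = N+1 := by simp [hlen]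
      have hinv2 : ∀ u, k < u → u ≤ N → (szl.set (k+1) ((sz N (k+1) : Int))).getD u 0 = (sz N u : Int) := by
        intro u hu huN
        rw [getD_set_helper szl (k+1) (by omega) _ u]
        by_cases hu1 : u = k+1
        · rw [if_pos hu1, hu1]
        · rw [if_neg hu1]
          exact hinv u (by omega) huN
      rw [ih _ (by omega) hlen2 hinv2, decide_eq_decide]
      constructor
      · intro hp v h2 h1
        by_cases hv1 : v = k+1
        · subst hv1; omega
        · exact hp v (by omega) h1
      · intro hp v h2 h1
        exact hp v (by omega) h1


theorem getD_replicate_zero (N w : Nat) : (List.replicate N (0:Int)).getD w 0 = 0 := by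
  unfold List.getD
  rw [List.getElem?_replicate]
  split <;> simp

theorem solve_eq_alt (arr : List Int) (n : Int) (hpre : n ≤ (arr.length : Int)) :
    solve arr n = solve_alt arr n := by
  by_cases hn0 : n ≤ 0
  · have h0 : n.toNat = 0 := by omega
    unfold solve solve_alt
    rw [if_pos hn0, PySem.List.pyRange_one_eq_nil hn0]
    simp [h0, loopA]
  · obtain ⟨N, rfl⟩ : ∃ N : Nat, n = (N : Int) := ⟨n.toNat, by omega⟩
    have hN : 1 ≤ N := by omega
    have hlenA : N ≤ arr.length := by exact_mod_cast hpre
    have htN : (((N:Int)) + 1).toNat = N + 1 := by omega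
    have hinit : (List.replicate (((N:Int)) + 1).toNat (0:Int)).length = N + 1 := by
      rw [htN]; simp
    -- the element list both programs fold over
    have hmap : (PySem.List.pyRange 0 (N:Int) 1).map (fun i => PySem.List.pyGetD arr i 0)
        = arr.take N := by
      apply List.ext_getElem
      · simp [PySem.List.length_pyRange_one]
        omega
      · intro i h1 h2
        have hi : i < N := by
          simpa [PySem.List.length_pyRange_one] using h1
        rw [List.getElem_map, PySem.List.getElem_pyRange_one, List.getElem_take]
        have : (0 : Int) + (i : Int) = ((i : Nat) : Int) := by omega
        rw [this, PySem.List.pyGetD_natCast, List.getD_eq_getElem arr 0 (by omega)]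
    -- A's count list
    have hA := foldl_pointwise N (fun c x => chainAddA (N:Int) x c) (indN N)
      (fun c x hc => ⟨by rw [chainAddA_length]; exact hc, fun w => chainAddA_getD N w x c hc⟩)
      (arr.take N) (List.replicate (((N:Int)) + 1).toNat 0) hinit
    -- B's count list
    have hB := foldl_pointwise N (fun c x => bAdd (bSkip (N:Int) x) c) (indN N)
      (fun c x hc => ⟨by rw [bAdd_length]; exact hc,
        fun w => by
          rw [bAdd_getD N w (bSkip (N:Int) x) c (bSkip_le (N:Int) x (by omega)) hc,
              bSkip_ind N w x]⟩)
      (arr.take N) (List.replicate (((N:Int)) + 1).toNat 0) hinit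
    unfold solve solve_alt
    rw [if_neg (by omega : ¬ ((N:Int) ≤ 0))]
    dsimp only
    have hfold : List.foldl (fun c i => chainAddA ((N:Int)) (PySem.List.pyGetD arr i 0) c)
        (List.replicate (((N:Int)) + 1).toNat 0) (PySem.List.pyRange 0 (N:Int) 1)
        = List.foldl (fun c x => chainAddA ((N:Int)) x c)
            (List.replicate (((N:Int)) + 1).toNat 0) (arr.take N) := by
      rw [← hmap, List.foldl_map]
    rw [hfold]
    rw [PySem.List.slice_to_natCast]
    have hNt : ((N:Int)).toNat = N := by omega
    rw [hNt]
    -- A side: greedy = Hall condition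
    rw [loopA_gA N _ (by rw [hA.1]; omega)]
    have hfA : (fun w => ((arr.take N).foldl (fun c x => chainAddA (N:Int) x c)
        (List.replicate (((N:Int)) + 1).toNat 0)).getD w 0)
        = fun w => cnt N (arr.take N) w - subC N N w := by
      funext w
      rw [hA.2 w, getD_replicate_zero, subC_top]
      unfold cnt
      ring
    rw [hfA, gA_hall N (cnt N (arr.take N)) (cnt_nonneg N (arr.take N))
          (fun v hv => cnt_sup N (arr.take N) v hv) N (le_refl N)
          (fun u h1 h2 => absurd (by omega : u ≤ u) (by omega))]
    -- B side: size loop = Hall condition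
    rw [sizeLoop_spec N _ (List.replicate (((N:Int)) + 1).toNat 0) N (le_refl N)
          hinit (fun u h1 h2 => absurd (by omega : u ≤ u) (by omega))]
    rw [decide_eq_decide]
    constructor
    · intro hp v h2 h1
      rw [hB.2 v, getD_replicate_zero]
      have hv := hp v h2 h1
      unfold cnt at hv
      omega
    · intro hp v h2 h1
      have hv := hp v h2 h1
      rw [hB.2 v, getD_replicate_zero] at hv
      unfold cnt
      omega

-- ===== VERDICT (by name: the statement is the Claim_ definition above) =====
theorem solve_spec : Claim_equal_solve := by
  intro arr n _ hpre
  unfold Spec_solve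
  exact solve_eq_alt arr n hpre
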